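-- pv_equiv track=rewrite | github.com/laurelhiatt/inSTRbility | inSTRbility/instability_utils.py | get_pure_stretches
-- ===== SOURCE A (Python) =====
-- def nonatomic(motif, motif_length):
--     """
--     Check if the sequence is composed of pure stretches of a given motif length.
--     Args:
--         sequence (str): The input sequence to check.
--         motif_length (int): The length of the motif to check for.
--     Returns:
--         bool: True if the sequence is composed of pure stretches, False otherwise.
--     """
--
--     for i in range(1, motif_length//2 + 1):
--         if motif_length % i != 0: continue
--         amotif = motif[:i]; units = motif_length // i
--         if amotif * units == motif:
--             return True
--     return False
--
-- def get_pure_stretches(sequence, mlen):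
--     """
--     Find the pure stretches of a given motif length in a sequence.
--     Args:
--         sequence (str): The input sequence to search for repeats.
--         mlen (int): The length of the motif to search for.
--     Returns:
--         list: A list of tuples containing the motif, start index, and end index of each repeat.
--     """
--
--     repeats = []
--     slen = len(sequence)
--     i = 0
--     while i < slen - mlen + 1:
--         motif = sequence[i:i + mlen]
--
--         if motif == sequence[i+mlen: i+2*mlen]:
--             repeat_start = i
--             repeat_end = i + 2*mlen
--             m = 0
--             j = i + 2 * mlen
--             while j < slen and sequence[j] == motif[m]:
--                 m += 1
--                 j += 1
--                 repeat_end = j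
--                 if m == mlen: m = 0
--             if not nonatomic(motif, mlen):
--                 repeats.append((motif, repeat_start, repeat_end))
--
--             i = j - (mlen - 1)
--
--         i += 1
--
--     return repeats
-- ===== SOURCE B (Python) =====
-- def get_pure_stretches(sequence, mlen):
--     """Run-length based scan: one right-to-left pass builds run[k] = number of
--     consecutive positions from k with sequence[k] == sequence[k+mlen]; then a
--     repeat starts at i exactly when run[i] >= mlen and extends to
--     i + run[i] + mlen, so detection and extension are O(1) per position."""
--     slen = len(sequence)
--     run = [0]
--     for k in range(slen - mlen - 1, -1, -1):
--         run.append(run[-1] + 1 if sequence[k] == sequence[k + mlen] else 0)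
--     run.reverse()
--     repeats = []
--     i = 0
--     while i <= slen - 2 * mlen:
--         r = run[i]
--         if r >= mlen:
--             motif = sequence[i:i + mlen]
--             if not any(mlen % d == 0 and motif[:d] * (mlen // d) == motif
--                        for d in range(1, mlen // 2 + 1)):
--                 repeats.append((motif, i, i + r + mlen))
--             i += r + 2
--         else:
--             i += 1
--     return repeats
-- ===== Notes on version B (the rewrite author's own statement) =====
-- stated objective: faster
-- what changed: Instead of comparing an mlen-long slice at every position and extending each match with an inner character loop, B precomputes in one right-to-left pass run[k] = length of the agreement run sequence[k..]==sequence[k+mlen..], so detection (run[i] >= mlen) and extension (end = i + run[i] + mlen) are O(1) per position.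
-- outside the precondition, e.g. on get_pure_stretches('', 0): A returns [('', 0, 0)], B returns [('', 0, 0)]
import Mathlib
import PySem

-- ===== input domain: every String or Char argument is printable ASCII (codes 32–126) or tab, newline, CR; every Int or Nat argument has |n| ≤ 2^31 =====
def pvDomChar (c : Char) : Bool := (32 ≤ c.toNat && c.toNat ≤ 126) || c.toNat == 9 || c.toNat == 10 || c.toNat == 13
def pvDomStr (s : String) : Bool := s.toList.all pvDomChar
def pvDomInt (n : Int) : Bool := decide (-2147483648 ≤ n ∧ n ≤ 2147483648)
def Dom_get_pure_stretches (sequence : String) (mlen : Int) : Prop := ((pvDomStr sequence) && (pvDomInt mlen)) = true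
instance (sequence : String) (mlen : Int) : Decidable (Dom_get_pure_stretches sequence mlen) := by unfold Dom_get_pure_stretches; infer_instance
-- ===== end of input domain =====

-- B is a run-length based rewrite of A (one pass precomputes agreement runs); equivalence of return values is proved under Pre_ (mlen ≥ 1).

-- ===== PORT A =====

-- Python 'amotif * units' (string repetition; non-positive count gives the empty string — exact)
def pvStrMul (l : List Char) (u : Int) : List Char := (List.replicate u.toNat l).flatten

-- the early-return 'for i in range(...)' loop of nonatomic, over the materialised range
def pvNonatomicGo (motif : List Char) (motif_length : Int) : List Int → Bool
  | [] => false
  | d :: ds =>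
    if PySem.Int.mod motif_length d ≠ 0 then pvNonatomicGo motif motif_length ds
    else
      let amotif := PySem.List.slice motif none (some d)
      let units := PySem.Int.floordiv motif_length d
      if pvStrMul amotif units = motif then true
      else pvNonatomicGo motif motif_length ds

def pvNonatomic (motif : List Char) (motif_length : Int) : Bool :=
  pvNonatomicGo motif motif_length
    (PySem.List.pyRange 1 (PySem.Int.floordiv motif_length 2 + 1) 1)

-- inner 'while j < slen and sequence[j] == motif[m]' loop; state (j, m, repeat_end); fuel ≥ remaining iterations
def pvInnerA (s motif : List Char) (slen mlen : Int) : Nat → Int → Int → Int → Int × Int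
  | 0, j, _, re => (j, re)
  | fuel + 1, j, m, re =>
    if j < slen ∧ PySem.List.pyGetD s j ' ' = PySem.List.pyGetD motif m ' ' then
      let m1 := m + 1
      let j1 := j + 1
      let re1 := j1
      pvInnerA s motif slen mlen fuel j1 (if m1 = mlen then 0 else m1) re1
    else (j, re)

-- outer 'while i < slen - mlen + 1' loop; fuel ≥ remaining iterations
def pvOuterA (s : List Char) (slen mlen : Int) :
    Nat → Int → List (String × Int × Int) → List (String × Int × Int)
  | 0, _, acc => acc
  | fuel + 1, i, acc =>
    if i < slen - mlen + 1 then
      let motif := PySem.List.slice s (some i) (some (i + mlen))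
      if motif = PySem.List.slice s (some (i + mlen)) (some (i + 2 * mlen)) then
        let repeat_start := i
        let jre := pvInnerA s motif slen mlen (s.length + 1) (i + 2 * mlen) 0 (i + 2 * mlen)
        let acc' := if pvNonatomic motif mlen then acc
                    else acc ++ [(String.ofList motif, repeat_start, jre.2)]
        pvOuterA s slen mlen fuel (jre.1 - (mlen - 1) + 1) acc'
      else pvOuterA s slen mlen fuel (i + 1) acc
    else acc

def get_pure_stretches (sequence : String) (mlen : Int) : List (String × Int × Int) :=
  let s := sequence.toList
  let slen : Int := (s.length : Int)
  pvOuterA s slen mlen (s.length + 2) 0 []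

-- ===== PORT B =====

-- scan with the precomputed run list: repeat at i iff run[i] >= mlen, extending to i + run[i] + mlen
def pvOuterB (run : List Int) (s : List Char) (slen mlen : Int) :
    Nat → Int → List (String × Int × Int) → List (String × Int × Int)
  | 0, _, acc => acc
  | fuel + 1, i, acc =>
    if i ≤ slen - 2 * mlen then
      let r := PySem.List.pyGetD run i 0
      if mlen ≤ r then
        let motif := PySem.List.slice s (some i) (some (i + mlen))
        let acc' := if (PySem.List.pyRange 1 (PySem.Int.floordiv mlen 2 + 1) 1).any
              (fun d => decide (PySem.Int.mod mlen d = 0) &&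
                decide (pvStrMul (PySem.List.slice motif none (some d)) (PySem.Int.floordiv mlen d) = motif))
            then acc
            else acc ++ [(String.ofList motif, i, i + r + mlen)]
        pvOuterB run s slen mlen fuel (i + r + 2) acc'
      else pvOuterB run s slen mlen fuel (i + 1) acc
    else acc

def get_pure_stretches_alt (sequence : String) (mlen : Int) : List (String × Int × Int) :=
  let s := sequence.toList
  let slen : Int := (s.length : Int)
  -- 'run = [0]; for k in range(slen-mlen-1,-1,-1): run.append(...); run.reverse()'
  let run := ((PySem.List.pyRange (slen - mlen - 1) (-1) (-1)).foldl
      (fun r k =>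
        r ++ [if PySem.List.pyGetD s k ' ' = PySem.List.pyGetD s (k + mlen) ' '
              then PySem.List.pyGetD r (-1) 0 + 1 else 0]) [(0 : Int)]).reverse
  pvOuterB run s slen mlen (s.length + 2) 0 []

-- ===== PRECONDITION & SPEC =====
-- Pre_ excludes mlen ≤ 0: there A raises IndexError (motif[m] on an empty/short motif) on every
-- input except the fully degenerate ('', 0), where both programs return [("", 0, 0)].
def Pre_get_pure_stretches (sequence : String) (mlen : Int) : Prop := 1 ≤ mlen
instance (sequence : String) (mlen : Int) : Decidable (Pre_get_pure_stretches sequence mlen) := by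
  unfold Pre_get_pure_stretches; infer_instance

def pvWitness_get_pure_stretches : String × Int := ("ACACACG", 2)

def Spec_get_pure_stretches (sequence : String) (mlen : Int) (out : List (String × Int × Int)) : Prop := out = get_pure_stretches_alt sequence mlen
instance (sequence : String) (mlen : Int) (out : List (String × Int × Int)) : Decidable (Spec_get_pure_stretches sequence mlen out) := by unfold Spec_get_pure_stretches; infer_instance

-- ===== CLAIM (what is proved, stated in full; the proofs are below) =====
def Claim_equal_get_pure_stretches : Prop := ∀ (sequence : String) (mlen : Int), Dom_get_pure_stretches sequence mlen → Pre_get_pure_stretches sequence mlen → Spec_get_pure_stretches sequence mlen (get_pure_stretches sequence mlen)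

-- ===== LEMMAS AND PROOFS =====

def pvRunN (s : List Char) (m : Nat) (k : Nat) : Nat :=
  if h : k + m < s.length ∧ s.getD k ' ' = s.getD (k + m) ' ' then pvRunN s m (k + 1) + 1 else 0
termination_by s.length - k
decreasing_by omega

theorem pvRunN_le (s : List Char) (m k : Nat) : pvRunN s m k ≤ s.length - m - k := by
  fun_induction pvRunN s m k with
  | case1 k h ih => obtain ⟨h1, -⟩ := h; omega
  | case2 k h => omega

theorem pvRunN_ge_iff (s : List Char) (m k t : Nat) :
    t ≤ pvRunN s m k ↔ ∀ x, k ≤ x → x < k + t →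
      x + m < s.length ∧ s.getD x ' ' = s.getD (x + m) ' ' := by
  induction t generalizing k with
  | zero =>
    constructor
    · intro _ x h1 h2; omega
    · intro _; exact Nat.zero_le _
  | succ t ih =>
    rw [pvRunN]
    by_cases h : k + m < s.length ∧ s.getD k ' ' = s.getD (k + m) ' '
    · rw [dif_pos h]
      constructor
      · intro ht x hx1 hx2
        rcases Nat.eq_or_lt_of_le hx1 with rfl | hlt
        · exact h
        · exact (ih (k+1)).mp (by omega) x (by omega) (by omega)
      · intro hall
        have : t ≤ pvRunN s m (k+1) := (ih (k+1)).mpr (fun x h1 h2 => hall x (by omega) (by omega))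
        omega
    · rw [dif_neg h]
      constructor
      · omega
      · intro hall; exact absurd (hall k (by omega) (by omega)) h

theorem pvRunN_split (s : List Char) (m k t : Nat) (h : t ≤ pvRunN s m k) :
    pvRunN s m k = t + pvRunN s m (k + t) := by
  induction t generalizing k with
  | zero => simp
  | succ t ih =>
    have hc : k + m < s.length ∧ s.getD k ' ' = s.getD (k + m) ' ' := by
      by_contra hc
      rw [pvRunN, dif_neg hc] at h; omega
    rw [pvRunN, dif_pos hc] at h ⊢
    have ht : t ≤ pvRunN s m (k + 1) := by omega
    have := ih (k+1) ht
    have harg : k + 1 + t = k + (t + 1) := by omega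
    rw [this, harg]
    omega

theorem pv_match_iff (s : List Char) (m i : Nat) (hm : 1 ≤ m) (hi : i + m ≤ s.length) :
    ((s.drop i).take m = (s.drop (i + m)).take m) ↔ m ≤ pvRunN s m i := by
  rw [pvRunN_ge_iff]
  constructor
  · intro hEq
    have hlen := congrArg List.length hEq
    simp only [List.length_take, List.length_drop] at hlen
    have hbound : i + m + m ≤ s.length := by omega
    intro x hx1 hx2
    refine ⟨by omega, ?_⟩
    have hx := congrArg (fun l => l[x - i]?) hEq
    simp only [List.getElem?_take, List.getElem?_drop] at hx
    rw [if_pos (by omega : x - i < m), if_pos (by omega : x - i < m),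
      List.getElem?_eq_getElem (by omega), List.getElem?_eq_getElem (by omega)] at hx
    have e1 : i + (x - i) = x := by omega
    have e2 : i + m + (x - i) = x + m := by omega
    rw [List.getD_eq_getElem s ' ' (by omega), List.getD_eq_getElem s ' ' (by omega)]
    simp only [e1, e2] at hx
    exact Option.some.inj hx
  · intro hAll
    apply List.ext_getElem?
    intro x
    simp only [List.getElem?_take, List.getElem?_drop]
    by_cases hx : x < m
    · rw [if_pos hx, if_pos hx]
      obtain ⟨hb, he⟩ := hAll (i + x) (by omega) (by omega)
      rw [List.getElem?_eq_getElem (by omega), List.getElem?_eq_getElem (by omega)]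
      rw [List.getD_eq_getElem s ' ' (by omega), List.getD_eq_getElem s ' ' (by omega)] at he
      have e2 : i + x + m = i + m + x := by omega
      simp only [e2] at he
      exact congrArg some he
    · rw [if_neg hx, if_neg hx]

theorem pv_chain (s : List Char) (m i m0 k : Nat) (hm : 1 ≤ m)
    (heq : ∀ x, i ≤ x → x < i + m0 + k * m →
      x + m < s.length ∧ s.getD x ' ' = s.getD (x + m) ' ') :
    s.getD (i + m0 + k * m) ' ' = s.getD (i + m0) ' ' := by
  induction k with
  | zero => simp
  | succ k ih =>
    have hx := heq (i + m0 + k * m) (by omega)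
      (by have e : (k + 1) * m = k * m + m := by ring
          omega)
    have e : i + m0 + (k + 1) * m = (i + m0 + k * m) + m := by ring
    rw [e, ← hx.2]
    exact ih (fun x h1 h2 => heq x h1 (by omega))

theorem pvInnerA_eq (s : List Char) (m i : Nat) (hm : 1 ≤ m) (him : i + m ≤ s.length) :
    ∀ (fuel p m0 k : Nat), pvRunN s m p ≤ fuel → m0 < m → p = i + m0 + k * m → i + m ≤ p →
    (∀ x, i ≤ x → x < p → x + m < s.length ∧ s.getD x ' ' = s.getD (x + m) ' ') →
    pvInnerA s ((s.drop i).take m) (s.length) m fuel ((p : Int) + m) m0 ((p : Int) + m)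
      = (((p + pvRunN s m p + m : Nat) : Int), ((p + pvRunN s m p + m : Nat) : Int)) := by
  intro fuel
  induction fuel with
  | zero =>
    intro p m0 k hfuel hm0 hpk hple heq
    have hr0 : pvRunN s m p = 0 := by omega
    rw [pvInnerA, hr0]
    simp only [Prod.mk.injEq]
    constructor <;> push_cast <;> ring
  | succ fuel ih =>
    intro p m0 k hfuel hm0 hpk hple heq
    have hm0n : i + m0 < s.length := by omega
    have hmotif : ((s.drop i).take m).getD m0 ' ' = s.getD (i + m0) ' ' := by
      rw [List.getD_eq_getElem _ ' ' (by simp only [List.length_take, List.length_drop]; omega),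
        List.getD_eq_getElem s ' ' hm0n]
      simp [List.getElem_take, List.getElem_drop]
    have hchain : s.getD p ' ' = s.getD (i + m0) ' ' := by
      rw [hpk]; exact pv_chain s m i m0 k hm (hpk ▸ heq)
    have ej : ((p : Int) + m) = ((p + m : Nat) : Int) := by push_cast; ring
    have hget1 : PySem.List.pyGetD s ((p : Int) + m) ' ' = s.getD (p + m) ' ' := by
      rw [ej, PySem.List.pyGetD_natCast]
    have hget2 : PySem.List.pyGetD ((s.drop i).take m) (m0 : Int) ' '
        = s.getD (i + m0) ' ' := by
      rw [PySem.List.pyGetD_natCast, hmotif]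
    rw [pvInnerA]
    by_cases hc : p + m < s.length ∧ s.getD p ' ' = s.getD (p + m) ' '
    · have hcond : ((p : Int) + m < (s.length : Int) ∧
          PySem.List.pyGetD s ((p : Int) + m) ' '
            = PySem.List.pyGetD ((s.drop i).take m) (m0 : Int) ' ') := by
        refine ⟨by exact_mod_cast hc.1, ?_⟩
        rw [hget1, hget2, ← hchain]
        exact hc.2.symm
      rw [if_pos hcond]
      have hrun : pvRunN s m p = pvRunN s m (p + 1) + 1 := by rw [pvRunN, dif_pos hc]
      have hres := ih (p + 1) (if m0 + 1 = m then 0 else m0 + 1)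
        (if m0 + 1 = m then k + 1 else k)
        (by omega) (by split_ifs <;> omega)
        (by split_ifs with h
            · have e : i + 0 + (k + 1) * m = i + k * m + m := by ring
              rw [e]; omega
            · omega)
        (by omega)
        (by intro x h1 h2
            rcases Nat.lt_or_ge x p with hlt | hge
            · exact heq x h1 hlt
            · have : x = p := by omega
              rw [this]; exact hc)
      have ej1 : ((p : Int) + m + 1) = ((p + 1 : Nat) : Int) + m := by push_cast; ring
      have em0 : (if (m0 : Int) + 1 = (m : Int) then (0 : Int) else (m0 : Int) + 1)
          = ((if m0 + 1 = m then 0 else m0 + 1 : Nat) : Int) := by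
        split_ifs with h1 h2 h2 <;> push_cast <;> omega
      simp only [ej1, em0]
      rw [hres]
      simp only [Prod.mk.injEq]
      constructor <;> push_cast <;> omega
    · have hcond : ¬((p : Int) + m < (s.length : Int) ∧
          PySem.List.pyGetD s ((p : Int) + m) ' '
            = PySem.List.pyGetD ((s.drop i).take m) (m0 : Int) ' ') := by
        intro hcon
        apply hc
        refine ⟨by exact_mod_cast hcon.1, ?_⟩
        rw [hchain, ← hget2, ← hcon.2, hget1]
      rw [if_neg hcond]
      have hr0 : pvRunN s m p = 0 := by rw [pvRunN, dif_neg hc]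
      rw [hr0]
      simp only [Prod.mk.injEq]
      constructor <;> push_cast <;> ring

theorem pv_nonatomic_eq (motif : List Char) (m : Int) (ds : List Int) :
    pvNonatomicGo motif m ds
    = ds.any (fun d => decide (PySem.Int.mod m d = 0) &&
        decide (pvStrMul (PySem.List.slice motif none (some d)) (PySem.Int.floordiv m d) = motif)) := by
  induction ds with
  | nil => rfl
  | cons d ds ih =>
    by_cases h1 : PySem.Int.mod m d = 0 <;>
      by_cases h2 : pvStrMul (PySem.List.slice motif none (some d)) (PySem.Int.floordiv m d) = motif <;>
      simp [pvNonatomicGo, h1, h2, ih]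

theorem pv_run_aux (s : List Char) (m : Nat) :
    ∀ c : Nat, c ≤ s.length - m →
    (PySem.List.pyRange ((c : Int) - 1) (-1) (-1)).foldl
      (fun r k => r ++ [if PySem.List.pyGetD s k ' ' = PySem.List.pyGetD s (k + (m : Int)) ' '
            then PySem.List.pyGetD r (-1) 0 + 1 else 0])
      (((List.range' c (s.length - m + 1 - c)).map (fun k => (pvRunN s m k : Int))).reverse)
    = ((List.range (s.length - m + 1)).map (fun k => (pvRunN s m k : Int))).reverse := by
  intro c
  induction c with
  | zero =>
    intro _
    rw [PySem.List.pyRange_neg_one_eq_nil (by norm_num)]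
    rw [List.foldl_nil, List.range_eq_range', Nat.sub_zero]
  | succ c ih =>
    intro hc
    have e1 : ((c + 1 : Nat) : Int) - 1 = ((c : Nat) : Int) := by push_cast; ring
    rw [e1, PySem.List.pyRange_neg_one_cons (by omega), List.foldl_cons]
    have hlen : s.length - m + 1 - (c + 1) = (s.length - m - c - 1) + 1 := by omega
    rw [hlen, List.range'_succ, List.map_cons, List.reverse_cons]
    have hgets : PySem.List.pyGetD s ((c : Nat) : Int) ' ' = s.getD c ' ' :=
      PySem.List.pyGetD_natCast s c ' '
    have e2 : ((c : Nat) : Int) + (m : Int) = ((c + m : Nat) : Int) := by push_cast; ring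
    have hgets2 : PySem.List.pyGetD s (((c : Nat) : Int) + (m : Int)) ' ' = s.getD (c + m) ' ' := by
      rw [e2, PySem.List.pyGetD_natCast]
    simp only [hgets, hgets2, PySem.List.pyGetD_neg_one_append_singleton]
    have hval : (if s.getD c ' ' = s.getD (c + m) ' '
        then ((pvRunN s m (c + 1) : Nat) : Int) + 1 else 0) = ((pvRunN s m c : Nat) : Int) := by
      by_cases hcc : s.getD c ' ' = s.getD (c + m) ' '
      · rw [if_pos hcc]
        have hstep : pvRunN s m c = pvRunN s m (c + 1) + 1 := by
          rw [pvRunN, dif_pos ⟨by omega, hcc⟩]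
        rw [hstep]; push_cast; ring
      · rw [if_neg hcc]
        have hstep : pvRunN s m c = 0 := by
          rw [pvRunN, dif_neg (fun hcon => hcc hcon.2)]
        rw [hstep]; norm_num
    rw [hval]
    have hacc : (((List.range' (c + 1 + 1) (s.length - m - c - 1)).map
          (fun k => (pvRunN s m k : Int))).reverse ++ [((pvRunN s m (c + 1) : Nat) : Int)])
          ++ [((pvRunN s m c : Nat) : Int)]
        = ((List.range' c (s.length - m + 1 - c)).map (fun k => (pvRunN s m k : Int))).reverse := by
      have hl2 : s.length - m + 1 - c = (s.length - m - c - 1) + 1 + 1 := by omega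
      rw [hl2, List.range'_succ, List.range'_succ, List.map_cons, List.map_cons,
        List.reverse_cons, List.reverse_cons]
    rw [hacc]
    exact ih (by omega)

theorem pv_run_list (s : List Char) (m : Nat) :
    ((PySem.List.pyRange ((s.length : Int) - m - 1) (-1) (-1)).foldl
      (fun r k =>
        r ++ [if PySem.List.pyGetD s k ' ' = PySem.List.pyGetD s (k + (m : Int)) ' '
              then PySem.List.pyGetD r (-1) 0 + 1 else 0]) [(0 : Int)]).reverse
    = (List.range (s.length - m + 1)).map (fun k => (pvRunN s m k : Int)) := by
  by_cases hnm : m ≤ s.length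
  · have e1 : (s.length : Int) - m - 1 = ((s.length - m : Nat) : Int) - 1 := by push_cast [hnm]; ring
    have hinit : ([(0 : Int)])
        = ((List.range' (s.length - m) (s.length - m + 1 - (s.length - m))).map
            (fun k => (pvRunN s m k : Int))).reverse := by
      have : s.length - m + 1 - (s.length - m) = 1 := by omega
      rw [this, List.range'_one, List.map_singleton]
      have : pvRunN s m (s.length - m) = 0 := by
        rw [pvRunN, dif_neg (fun hcon => by omega)]
      simp [this]
    rw [e1, hinit, pv_run_aux s m (s.length - m) (by omega)]
    simp
  · have e1 : PySem.List.pyRange ((s.length : Int) - m - 1) (-1) (-1) = [] :=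
      PySem.List.pyRange_neg_one_eq_nil (by omega)
    rw [e1, List.foldl_nil]
    have e2 : s.length - m + 1 = 1 := by omega
    rw [e2]
    have : pvRunN s m 0 = 0 := by
      rw [pvRunN, dif_neg (fun hcon => by omega)]
    simp [this]

theorem pv_slice1 (s : List Char) (i m : Nat) :
    PySem.List.slice s (some (i : Int)) (some ((i : Int) + (m : Int))) = (s.drop i).take m :=
  PySem.List.slice_natCast_add s i m

theorem pv_slice2 (s : List Char) (i m : Nat) :
    PySem.List.slice s (some ((i : Int) + (m : Int))) (some ((i : Int) + 2 * (m : Int)))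
      = (s.drop (i + m)).take m := by
  have e1 : ((i : Int) + m) = ((i + m : Nat) : Int) := by push_cast; ring
  have e2 : ((i : Int) + 2 * m) = ((i + m : Nat) : Int) + (m : Int) := by push_cast; ring
  rw [e1, e2, PySem.List.slice_natCast_add]

theorem pvOuterA_tail (s : List Char) (m : Nat) (hm : 1 ≤ m) :
    ∀ (fuel i : Nat) (acc : List (String × Int × Int)),
      s.length + 1 ≤ fuel + i → s.length - 2 * m < i →
      pvOuterA s (s.length : Int) (m : Int) fuel (i : Int) acc = acc := by
  intro fuel
  induction fuel with
  | zero => intro i acc _ _; rfl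
  | succ fuel ih =>
    intro i acc hfuel hreg
    rw [pvOuterA]
    by_cases gA : (i : Int) < (s.length : Int) - (m : Int) + 1
    · rw [if_pos gA]
      have him : i + m ≤ s.length := by omega
      rw [pv_slice1, pv_slice2]
      rw [if_neg (fun hEq => by
        have h1 := (pv_match_iff s m i hm him).mp hEq
        have h2 := pvRunN_le s m i
        omega)]
      have e : (i : Int) + 1 = ((i + 1 : Nat) : Int) := by push_cast; ring
      rw [e]
      exact ih (i + 1) acc (by omega) (by omega)
    · rw [if_neg gA]

theorem pvOuter_eq (s : List Char) (m : Nat) (hm : 1 ≤ m) :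
    ∀ (fuel i : Nat) (acc : List (String × Int × Int)),
      s.length + 1 ≤ fuel + i →
      pvOuterA s (s.length : Int) (m : Int) fuel (i : Int) acc
        = pvOuterB ((List.range (s.length - m + 1)).map (fun k => (pvRunN s m k : Int)))
            s (s.length : Int) (m : Int) fuel (i : Int) acc := by
  intro fuel
  induction fuel with
  | zero => intro i acc _; rfl
  | succ fuel ih =>
    intro i acc hfuel
    rw [pvOuterA, pvOuterB]
    by_cases gB : i + 2 * m ≤ s.length
    · have gA : (i : Int) < (s.length : Int) - (m : Int) + 1 := by omega
      have gB' : (i : Int) ≤ (s.length : Int) - 2 * (m : Int) := by omega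
      rw [if_pos gA, if_pos gB']
      have hr : PySem.List.pyGetD
          ((List.range (s.length - m + 1)).map (fun k => (pvRunN s m k : Int))) (i : Int) 0
          = (pvRunN s m i : Int) := by
        rw [PySem.List.pyGetD_natCast,
          List.getD_eq_getElem _ _ (by simp only [List.length_map, List.length_range]; omega)]
        simp
      rw [hr, pv_slice1, pv_slice2]
      by_cases hmatch : m ≤ pvRunN s m i
      · rw [if_pos ((pv_match_iff s m i hm (by omega)).mpr hmatch),
          if_pos (by exact_mod_cast hmatch)]
        have hsplit : pvRunN s m i = m + pvRunN s m (i + m) := pvRunN_split s m i m hmatch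
        have einner : (i : Int) + 2 * m = ((i + m : Nat) : Int) + (m : Int) := by push_cast; ring
        have hinner := pvInnerA_eq s m i hm (by omega) (s.length + 1) (i + m) 0 1
          (by have := pvRunN_le s m (i + m); omega) (by omega) (by omega) (by omega)
          (by intro x h1 h2
              exact (pvRunN_ge_iff s m i m).mp hmatch x h1 (by omega))
        simp only [Nat.cast_zero] at hinner
        rw [einner, hinner]
        have hval2 : ((i + m + pvRunN s m (i + m) + m : Nat) : Int)
            = (i : Int) + (pvRunN s m i : Int) + (m : Int) := by push_cast; omega
        have hnexti : (i : Int) + (pvRunN s m i : Int) + (m : Int) - ((m : Int) - 1) + 1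
            = ((i + pvRunN s m i + 2 : Nat) : Int) := by push_cast; ring
        have hnexti2 : (i : Int) + (pvRunN s m i : Int) + 2
            = ((i + pvRunN s m i + 2 : Nat) : Int) := by push_cast; ring
        rw [pvNonatomic, pv_nonatomic_eq]
        simp only [hval2, hnexti, hnexti2]
        exact ih (i + pvRunN s m i + 2) _ (by omega)
      · rw [if_neg (fun hEq => hmatch ((pv_match_iff s m i hm (by omega)).mp hEq)),
          if_neg (by exact_mod_cast hmatch)]
        have e : (i : Int) + 1 = ((i + 1 : Nat) : Int) := by push_cast; ring
        rw [e]
        exact ih (i + 1) acc (by omega)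
    · rw [if_neg (by omega : ¬((i : Int) ≤ (s.length : Int) - 2 * (m : Int)))]
      by_cases gA : (i : Int) < (s.length : Int) - (m : Int) + 1
      · rw [if_pos gA]
        have him : i + m ≤ s.length := by omega
        rw [pv_slice1, pv_slice2]
        rw [if_neg (fun hEq => by
          have h1 := (pv_match_iff s m i hm him).mp hEq
          have h2 := pvRunN_le s m i
          omega)]
        have e : (i : Int) + 1 = ((i + 1 : Nat) : Int) := by push_cast; ring
        rw [e]
        exact pvOuterA_tail s m hm fuel (i + 1) acc (by omega) (by omega)
      · rw [if_neg gA]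

-- ===== VERDICT (by name: the statement is the Claim_ definition above) =====
theorem get_pure_stretches_spec : Claim_equal_get_pure_stretches := by
  intro sequence mlen _ hpre
  have hpre' : 1 ≤ mlen := hpre
  unfold Spec_get_pure_stretches get_pure_stretches get_pure_stretches_alt
  obtain ⟨m, rfl⟩ : ∃ m : Nat, mlen = (m : Int) :=
    ⟨mlen.toNat, (Int.toNat_of_nonneg (by omega)).symm⟩
  have hm : 1 ≤ m := by exact_mod_cast hpre'
  simp only [pv_run_list sequence.toList m]
  have h := pvOuter_eq sequence.toList m hm (sequence.toList.length + 2) 0 [] (by omega)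
  simpa using h
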